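-- pv_equiv track=rewrite | github.com/WillDinauer/AoC-2025 | day2/day2.py | windowed_check
-- ===== SOURCE A (Python) =====
-- def windowed_check(x, is_odd):
--     step = 2 if is_odd else 1
--     divisor = 3 if is_odd else 2
--     for ws in range(1, int(len(x) / divisor) + 1, step):
--         if len(x) % ws != 0:
--             continue
--         window = x[:ws]
--         failed = False
--         for i in range(ws, len(x), ws):
--             if window != x[i:i+ws]:
--                 failed = True
--                 break
--         if not failed:
--             return True
--     return False
-- ===== SOURCE B (Python) =====
-- def windowed_check(x, is_odd):
--     n = len(x)
--     if is_odd: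
--         return any(n % ws == 0 and x[:n - ws] == x[ws:]
--                    for ws in range(1, n // 3 + 1, 2))
--     return any(n % ws == 0 and x[:n - ws] == x[ws:]
--                for ws in range(1, n // 2 + 1))
-- ===== Notes on version B (the rewrite author's own statement) =====
-- stated objective: alternative
-- what changed: The inner chunk-by-chunk comparison loop with a failed flag and break is replaced by the shift-overlap periodicity test x[:n-ws] == x[ws:], so B is a single any(...) over the candidate window sizes with no inner loop and no flag.
import Mathlib
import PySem

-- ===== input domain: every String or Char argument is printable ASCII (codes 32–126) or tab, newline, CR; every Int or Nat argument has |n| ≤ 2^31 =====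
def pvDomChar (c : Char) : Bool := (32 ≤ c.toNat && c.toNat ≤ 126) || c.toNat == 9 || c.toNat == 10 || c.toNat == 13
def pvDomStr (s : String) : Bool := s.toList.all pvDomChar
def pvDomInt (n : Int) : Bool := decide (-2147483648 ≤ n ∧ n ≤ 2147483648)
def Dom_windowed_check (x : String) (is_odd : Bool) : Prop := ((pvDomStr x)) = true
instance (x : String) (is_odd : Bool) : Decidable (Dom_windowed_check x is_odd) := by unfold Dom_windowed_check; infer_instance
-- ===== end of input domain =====

-- B replaces A's inner chunk-comparison loop (failed flag + break) by the shift-overlap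
-- periodicity test x[:n-ws] == x[ws:] inside a single any(...) over candidate sizes (objective: alternative).

-- ===== PORT A =====
-- inner loop: 'for i in range(ws, len(x), ws): if window != x[i:i+ws]: failed = True; break'
def wcFail (xs window : List Char) (ws : Int) : List Int → Bool
  | [] => false
  | i :: rest =>
    if window ≠ PySem.List.slice xs (some i) (some (i + ws)) then true
    else wcFail xs window ws rest

-- outer loop with its early 'return True' / 'continue'
def wcOuter (xs : List Char) : List Int → Bool
  | [] => false
  | ws :: rest =>
    if PySem.Int.mod (xs.length : Int) ws ≠ 0 then wcOuter xs rest
    else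
      let window := PySem.List.slice xs none (some ws)
      let failed := wcFail xs window ws (PySem.List.pyRange ws (xs.length : Int) ws)
      if !failed then true else wcOuter xs rest

-- 'int(len(x) / divisor)' is ported as floor division: for len(x) ≥ 0 and divisor 2 or 3 Python's
-- int(float quotient) equals len(x) // divisor exactly (float division is exact far beyond these lengths).
def windowed_check (x : String) (is_odd : Bool) : Bool :=
  let xs := x.toList
  let step : Int := if is_odd then 2 else 1
  let divisor : Int := if is_odd then 3 else 2
  wcOuter xs (PySem.List.pyRange 1 (PySem.Int.floordiv (xs.length : Int) divisor + 1) step)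

-- ===== PORT B =====
def wcTest (xs : List Char) (ws : Int) : Bool :=
  (PySem.Int.mod (xs.length : Int) ws == 0) &&
    (PySem.List.slice xs none (some ((xs.length : Int) - ws)) == PySem.List.slice xs (some ws) none)

def windowed_check_alt (x : String) (is_odd : Bool) : Bool :=
  let xs := x.toList
  let n : Int := (xs.length : Int)
  if is_odd then
    (PySem.List.pyRange 1 (PySem.Int.floordiv n 3 + 1) 2).any (fun ws => wcTest xs ws)
  else
    (PySem.List.pyRange 1 (PySem.Int.floordiv n 2 + 1) 1).any (fun ws => wcTest xs ws)

-- ===== PRECONDITION & SPEC =====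
def Spec_windowed_check (x : String) (is_odd : Bool) (out : Bool) : Prop := out = windowed_check_alt x is_odd
instance (x : String) (is_odd : Bool) (out : Bool) : Decidable (Spec_windowed_check x is_odd out) := by unfold Spec_windowed_check; infer_instance

-- ===== CLAIM (what is proved, stated in full; the proofs are below) =====
def Claim_equal_windowed_check : Prop := ∀ (x : String) (is_odd : Bool), Dom_windowed_check x is_odd → Spec_windowed_check x is_odd (windowed_check x is_odd)

-- ===== LEMMAS AND PROOFS =====

-- the inner loop returns 'not failed' iff every chunk matches the window
theorem wcFail_false_iff (xs window : List Char) (ws : Int) (idxs : List Int) :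
    wcFail xs window ws idxs = false ↔
      ∀ i ∈ idxs, window = PySem.List.slice xs (some i) (some (i + ws)) := by
  induction idxs with
  | nil => simp [wcFail]
  | cons i rest ih =>
    simp only [wcFail]
    by_cases h : window = PySem.List.slice xs (some i) (some (i + ws))
    · rw [if_neg (by simp [h]), ih]
      constructor
      · intro hall a ha
        rcases List.mem_cons.mp ha with rfl | ha'
        · exact h
        · exact hall a ha'
      · intro hall a ha
        exact hall a (List.mem_cons_of_mem _ ha)
    · rw [if_pos (by simp [h])]
      constructor
      · intro hc; cases hc
      · intro hall
        exact absurd (hall i (List.mem_cons_self ..)) h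

-- pointwise periodicity propagated along multiples of w
theorem period_step (xs : List Char) (w : Nat)
    (hE : ∀ i, i + w < xs.length → xs[i]? = xs[i + w]?) :
    ∀ k r, r < w → k * w + r < xs.length → xs[k * w + r]? = xs[r]? := by
  intro k
  induction k with
  | zero => intro r _ _; simp
  | succ k ih =>
    intro r hr hlt
    have h2 : (k + 1) * w + r = k * w + r + w := by ring
    have h1 : (k * w + r) + w < xs.length := by omega
    have := hE (k * w + r) h1
    rw [h2, ← this]
    exact ih r hr (by omega)

-- a multiple of w that is another multiple's strict predecessor stays a block away
theorem mult_le_sub (w j N : Nat) (_hw : 0 < w) (hj : w ∣ j) (hN : w ∣ N)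
    (h : j < N) : j + w ≤ N := by
  obtain ⟨a, ha⟩ := hj
  obtain ⟨m, hm⟩ := hN
  subst ha hm
  have ham : a < m := Nat.lt_of_mul_lt_mul_left (by omega)
  calc w * a + w = w * (a + 1) := by ring
    _ ≤ w * m := Nat.mul_le_mul_left w (by omega)

-- the core equivalence: all chunks equal the prefix ⟺ shift-overlap equality
theorem periodic_iff (xs : List Char) (w : Nat) (hw : 1 ≤ w)
    (hdvd : w ∣ xs.length) (h2 : 2 * w ≤ xs.length) :
    (∀ j : Nat, w ≤ j → j < xs.length → w ∣ j →
        xs.take w = (xs.drop j).take w) ↔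
      xs.take (xs.length - w) = xs.drop w := by
  constructor
  · intro hP
    -- pointwise: xs[i] = xs[i % w] for any i < length
    have key : ∀ i, i < xs.length → xs[i]? = xs[i % w]? := by
      intro i hi
      rcases Nat.lt_or_ge i w with h | h
      · rw [Nat.mod_eq_of_lt h]
      · have hj : w ≤ (i / w) * w := by
          have h1 : 1 ≤ i / w := (Nat.one_le_div_iff (by omega)).2 h
          calc w = 1 * w := (one_mul w).symm
            _ ≤ (i / w) * w := Nat.mul_le_mul_right w h1
        have hjlt : (i / w) * w < xs.length := lt_of_le_of_lt (Nat.div_mul_le_self i w) hi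
        have heq := hP ((i / w) * w) hj hjlt ⟨i / w, Nat.mul_comm _ _⟩
        have hmod : i % w < w := Nat.mod_lt _ (by omega)
        have hidx : (i / w) * w + i % w = i := by
          rw [Nat.mul_comm]; exact Nat.div_add_mod i w
        have := congrArg (fun l => l[i % w]?) heq
        simp only [List.getElem?_take, List.getElem?_drop, if_pos hmod, hidx] at this
        exact this.symm
    apply List.ext_getElem?
    intro i
    rw [List.getElem?_take, List.getElem?_drop]
    by_cases hi : i < xs.length - w
    · rw [if_pos hi, key i (by omega), key (w + i) (by omega),
          Nat.add_comm w i, Nat.add_mod_right]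
    · rw [if_neg hi, eq_comm]
      exact List.getElem?_eq_none (by omega)
  · intro hQ
    have hE : ∀ i, i + w < xs.length → xs[i]? = xs[i + w]? := by
      intro i hi
      have := congrArg (fun l => l[i]?) hQ
      simp only [List.getElem?_take, List.getElem?_drop, if_pos (by omega : i < xs.length - w)] at this
      rw [this, Nat.add_comm]
    intro j hjw hjN hdj
    have hjle : j + w ≤ xs.length := mult_le_sub w j xs.length (by omega) hdj hdvd hjN
    obtain ⟨k, hk⟩ := hdj
    apply List.ext_getElem?
    intro r
    rw [List.getElem?_take, List.getElem?_take, List.getElem?_drop]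
    by_cases hr : r < w
    · rw [if_pos hr, if_pos hr]
      have hps := period_step xs w hE k r hr (by rw [Nat.mul_comm] at hk; omega)
      rw [Nat.mul_comm w k] at hk
      rw [← hk] at hps
      exact hps.symm
    · rw [if_neg hr, if_neg hr]

-- one candidate of A's outer loop equals B's test, for 1 ≤ ws with 2*ws ≤ n
theorem candidate_eq (xs : List Char) (ws : Int) (hw : 1 ≤ ws)
    (h2 : 2 * ws ≤ (xs.length : Int)) :
    (if PySem.Int.mod (xs.length : Int) ws ≠ 0 then false
     else !wcFail xs (PySem.List.slice xs none (some ws)) ws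
            (PySem.List.pyRange ws (xs.length : Int) ws)) = wcTest xs ws := by
  by_cases hmod : PySem.Int.mod (xs.length : Int) ws = 0
  · have hwpos : 0 < ws := hw
    have hdvdZ : ws ∣ (xs.length : Int) := by
      apply Int.dvd_of_emod_eq_zero
      have := hmod
      rw [PySem.Int.mod, Int.fmod_eq_emod, if_pos (Or.inl (by omega)), add_zero] at this
      exact this
    obtain ⟨w, hwN⟩ : ∃ w : Nat, ws = (w : Int) :=
      ⟨ws.toNat, (Int.toNat_of_nonneg (by omega)).symm⟩
    subst hwN
    have hw1 : 1 ≤ w := by exact_mod_cast hw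
    have hdvd : w ∣ xs.length := by
      obtain ⟨c, hc⟩ := hdvdZ
      have hc0 : 0 ≤ c := by nlinarith [hc, Int.natCast_nonneg xs.length]
      refine ⟨c.toNat, ?_⟩
      have : ((xs.length : Nat) : Int) = ((w * c.toNat : Nat) : Int) := by
        push_cast
        rw [Int.toNat_of_nonneg hc0, hc]
      exact_mod_cast this
    have h2N : 2 * w ≤ xs.length := by exact_mod_cast h2
    rw [if_neg (by simp [hmod])]
    have hiff := periodic_iff xs w hw1 hdvd h2N
    have hchunks : (wcFail xs (PySem.List.slice xs none (some ((w : Int)))) (w : Int)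
        (PySem.List.pyRange (w : Int) (xs.length : Int) (w : Int)) = false) ↔
        xs.take (xs.length - w) = xs.drop w := by
      rw [wcFail_false_iff, ← hiff]
      constructor
      · intro h j hjw hjN hdj
        have hmem : (j : Int) ∈ PySem.List.pyRange (w : Int) (xs.length : Int) (w : Int) := by
          rw [PySem.List.mem_pyRange_iff_of_pos (by exact_mod_cast hw)]
          refine ⟨by exact_mod_cast hjw, by exact_mod_cast hjN, ?_⟩
          obtain ⟨k, hk⟩ := hdj
          refine ⟨(k : Int) - 1, ?_⟩
          rw [hk]; push_cast; ring
        have := h (j : Int) hmem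
        rw [PySem.List.slice_to_natCast, PySem.List.slice_natCast_add] at this
        exact this
      · intro h i hi
        rw [PySem.List.mem_pyRange_iff_of_pos (by exact_mod_cast hw)] at hi
        obtain ⟨hi1, hi2, k, hk⟩ := hi
        obtain ⟨j, hj⟩ : ∃ j : Nat, i = (j : Int) :=
          ⟨i.toNat, (Int.toNat_of_nonneg (by omega)).symm⟩
        subst hj
        rw [PySem.List.slice_to_natCast, PySem.List.slice_natCast_add]
        refine h j (by exact_mod_cast hi1) (by exact_mod_cast hi2) ?_
        have hk0 : 0 ≤ k := by nlinarith [hk]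
        refine ⟨k.toNat + 1, ?_⟩
        have : ((j : Nat) : Int) = ((w * (k.toNat + 1) : Nat) : Int) := by
          push_cast
          rw [Int.toNat_of_nonneg hk0]
          linarith [hk, mul_add ((w : Int)) k 1, mul_one ((w : Int))]
        exact_mod_cast this
    have hnw : (xs.length : Int) - (w : Int) = ((xs.length - w : Nat) : Int) := by
      have hwle : w ≤ xs.length := by omega
      push_cast [hwle]
      ring
    have hmb : (PySem.Int.mod (xs.length : Int) ((w : Int)) == 0) = true := by
      simp [hmod]
    rw [wcTest, hmb, Bool.true_and, hnw, PySem.List.slice_to_natCast,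
        PySem.List.slice_to_natCast, PySem.List.slice_from_natCast]
    rw [PySem.List.slice_to_natCast] at hchunks
    by_cases hq : xs.take (xs.length - w) = xs.drop w
    · rw [hchunks.mpr hq]
      simp [hq]
    · have hF := Bool.ne_false_iff.mp (fun h => hq (hchunks.mp h))
      rw [hF]
      simp [hq]
  · rw [if_pos hmod, wcTest]
    simp [hmod]

-- A's outer loop over any candidate list with 1 ≤ ws and 2*ws ≤ n is B's any
theorem outer_eq_any (xs : List Char) (L : List Int)
    (h : ∀ ws ∈ L, 1 ≤ ws ∧ 2 * ws ≤ (xs.length : Int)) :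
    wcOuter xs L = L.any (fun ws => wcTest xs ws) := by
  induction L with
  | nil => simp [wcOuter]
  | cons ws rest ih =>
    have hws := h ws (List.mem_cons_self ..)
    have hrest : ∀ w ∈ rest, 1 ≤ w ∧ 2 * w ≤ (xs.length : Int) :=
      fun w hw => h w (List.mem_cons_of_mem _ hw)
    have hc := candidate_eq xs ws hws.1 hws.2
    rw [List.any_cons, ← hc, ← ih hrest]
    simp only [wcOuter]
    by_cases hmod : PySem.Int.mod (xs.length : Int) ws = 0
    · rw [if_neg (not_not_intro hmod), if_neg (not_not_intro hmod)]
      cases hfb : wcFail xs (PySem.List.slice xs none (some ws)) ws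
          (PySem.List.pyRange ws (xs.length : Int) ws) <;> simp [hfb]
    · rw [if_pos hmod, if_pos hmod]
      simp

-- every candidate in the range satisfies the side conditions
theorem range_bounds (n divisor step : Int) (hd : 2 ≤ divisor) (hs : 0 < step)
    (_hn : 0 ≤ n) :
    ∀ ws ∈ PySem.List.pyRange 1 (PySem.Int.floordiv n divisor + 1) step,
      1 ≤ ws ∧ 2 * ws ≤ n := by
  intro ws hmem
  rw [PySem.List.mem_pyRange_iff_of_pos hs] at hmem
  obtain ⟨h1, h2, _⟩ := hmem
  refine ⟨h1, ?_⟩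
  have hle : ws ≤ n / divisor := by
    rw [PySem.Int.floordiv, Int.fdiv_eq_ediv, if_pos (Or.inl (by omega)), sub_zero] at h2
    omega
  have hmul := (Int.le_ediv_iff_mul_le (by omega : (0:Int) < divisor)).mp hle
  nlinarith

-- ===== VERDICT (by name: the statement is the Claim_ definition above) =====
theorem windowed_check_spec : Claim_equal_windowed_check := by
  intro x is_odd _
  unfold Spec_windowed_check windowed_check windowed_check_alt
  cases is_odd with
  | false =>
    simp only [Bool.false_eq_true, if_false]
    exact outer_eq_any _ _ (range_bounds _ 2 1 le_rfl one_pos (Int.natCast_nonneg _))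
  | true =>
    simp only [if_true]
    exact outer_eq_any _ _ (range_bounds _ 3 2 (by omega) (by omega) (Int.natCast_nonneg _))
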